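-- pv_equiv track=rewrite | github.com/cactus273/Portfolio | Python Projects/Bejeweled AI Player.py | fill_gap
-- ===== SOURCE A (Python) =====
-- BLANK_PIECE = "Z"
--
-- def fill_gap(board):
--     """ Accepts the board grid, move all non-blank pieces up to fill gaps, then
--     moves left to fill remaining gaps. Returns mutated board."""
--     # First, arrange the board array to by column (board[column][row] = value),
--     # move blank pieces to the the bottom of the grid. Second, arrange the
--     # board grid back to by row, moving blank pieces to the right of the grid.
--     for i in range(2):
--         board = list(map(list, list(zip(*board))))
--         for column in board:
--             count = column.count(BLANK_PIECE)
--             for blanks in range(count):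
--                 column.remove(BLANK_PIECE)
--                 column.append(BLANK_PIECE)
--
--     return board
-- ===== SOURCE B (Python) =====
-- BLANK_PIECE = "Z"
--
-- def _collapse(rows):
--     """Transpose, then in each resulting list keep non-blank pieces in order
--     and pad with blanks on the right (single filter pass per list)."""
--     out = []
--     for tup in zip(*rows):
--         kept = [x for x in tup if x != BLANK_PIECE]
--         out.append(kept + [BLANK_PIECE] * (len(tup) - len(kept)))
--     return out
--
-- def fill_gap(board):
--     # collapse blanks to the bottom of each column, then to the right of each row
--     return _collapse(_collapse(board))
-- ===== Notes on version B (the rewrite author's own statement) =====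
-- stated objective: alternative
-- what changed: B replaces A's per-column repeated count/remove/append passes by a single filter pass per column/row followed by padding with blanks, applied twice via one small helper; fewer passes per list but not measurably faster on the generated inputs.
import Mathlib
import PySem

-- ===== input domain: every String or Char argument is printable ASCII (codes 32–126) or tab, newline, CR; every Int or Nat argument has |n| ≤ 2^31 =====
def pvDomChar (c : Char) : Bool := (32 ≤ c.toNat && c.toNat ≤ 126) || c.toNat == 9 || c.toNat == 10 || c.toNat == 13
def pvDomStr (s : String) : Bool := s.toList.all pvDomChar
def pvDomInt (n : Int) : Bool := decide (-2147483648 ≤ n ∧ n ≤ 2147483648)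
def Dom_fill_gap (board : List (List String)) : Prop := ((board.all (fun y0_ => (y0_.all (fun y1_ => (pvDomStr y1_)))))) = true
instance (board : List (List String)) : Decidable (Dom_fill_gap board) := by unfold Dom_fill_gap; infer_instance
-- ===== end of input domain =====

-- B collapses each column/row with one filter pass plus right-padding instead of
-- A's repeated count/remove/append scans (objective: alternative decomposition).

-- shared helper: Python's list(map(list, zip(*rows))) — transpose truncated to the
-- shortest row (zip stops at the shortest iterable); exact for ragged inputs too
def pvZipStar (rows : List (List String)) : List (List String) :=
  match rows with
  | [] => []
  | r :: rs =>
    let m := rs.foldl (fun acc l => Nat.min acc l.length) r.length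
    (List.range m).map (fun j => (r :: rs).map (fun row => row.getD j ""))

-- ===== PORT A =====
-- one iteration of A's inner 'column.remove(BLANK); column.append(BLANK)'
-- (remove? always succeeds here since the loop runs exactly count(BLANK) times)
def pvStepA (col : List String) : List String :=
  ((PySem.List.remove? col "Z").getD col) ++ ["Z"]

-- A's body of 'for column in board': count blanks, then remove/append that many times
def pvColA (column : List String) : List String :=
  let count := PySem.List.count column "Z"
  (PySem.List.pyRange 0 (count : Int) 1).foldl (fun c _ => pvStepA c) column

def fill_gap (board : List (List String)) : List (List String) :=
  (PySem.List.pyRange 0 2 1).foldl (fun b _ => (pvZipStar b).map pvColA) board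

-- ===== PORT B =====
def pvColB (tup : List String) : List String :=
  let kept := tup.filter (fun x => x != "Z")
  kept ++ List.replicate (tup.length - kept.length) "Z"

def pvCollapse (rows : List (List String)) : List (List String) :=
  (pvZipStar rows).map pvColB

def fill_gap_alt (board : List (List String)) : List (List String) :=
  pvCollapse (pvCollapse board)

-- ===== PRECONDITION & SPEC =====
def Spec_fill_gap (board : List (List String)) (out : List (List String)) : Prop := out = fill_gap_alt board
instance (board : List (List String)) (out : List (List String)) : Decidable (Spec_fill_gap board out) := by unfold Spec_fill_gap; infer_instance

-- ===== CLAIM (what is proved, stated in full; the proofs are below) =====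
def Claim_equal_fill_gap : Prop := ∀ (board : List (List String)), Dom_fill_gap board → Spec_fill_gap board (fill_gap board)

-- ===== LEMMAS AND PROOFS =====

theorem pv_filter_len (c : List String) :
    (c.filter (fun x => x != "Z")).length + c.count "Z" = c.length := by
  induction c with
  | nil => simp
  | cons x t ih =>
    by_cases hx : x = "Z" <;> simp [hx] <;> omega

-- folding an ignored loop variable is function iteration
theorem pv_foldl_iterate (xs : List Int) (l : List String) :
    xs.foldl (fun c _ => pvStepA c) l = pvStepA^[xs.length] l := by
  induction xs generalizing l with
  | nil => rfl
  | cons x t ih => simpa [Function.iterate_succ_apply] using ih (pvStepA l)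

theorem pv_step_cons (x : String) (hx : x ≠ "Z") (r : List String) :
    pvStepA (x :: r) = x :: pvStepA r := by
  unfold pvStepA
  rw [PySem.List.remove?_cons_of_ne _ (by simpa using hx)]
  cases h : PySem.List.remove? r "Z" <;> simp

theorem pv_iter_cons (x : String) (hx : x ≠ "Z") (k : ℕ) (r : List String) :
    pvStepA^[k] (x :: r) = x :: pvStepA^[k] r := by
  induction k generalizing r with
  | zero => rfl
  | succ k ih => simp [Function.iterate_succ_apply, pv_step_cons x hx, ih]

-- the heart: iterating remove/append (count a) times on a ++ blanks = filter + pad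
theorem pv_iter_eq (a : List String) (m : ℕ) :
    pvStepA^[a.count "Z"] (a ++ List.replicate m "Z")
      = a.filter (fun x => x != "Z") ++ List.replicate (m + a.count "Z") "Z" := by
  induction a generalizing m with
  | nil => simp
  | cons x t ih =>
    by_cases hx : x = "Z"
    · subst hx
      have h1 : pvStepA (("Z" : String) :: (t ++ List.replicate m "Z"))
          = t ++ List.replicate (m + 1) "Z" := by
        unfold pvStepA
        simp [List.replicate_succ' (n := m)]
      simp only [List.count_cons_self, Function.iterate_succ_apply, List.cons_append, h1]
      rw [ih (m + 1)]
      simp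
      omega
    · have hc : (x :: t).count "Z" = t.count "Z" := by
        simp [hx]
      rw [hc, List.cons_append, pv_iter_cons x hx, ih m,
          List.filter_cons_of_pos (by simpa using hx)]
      rfl

theorem pv_colA_eq_colB (c : List String) : pvColA c = pvColB c := by
  unfold pvColA pvColB
  have hlen : (PySem.List.pyRange 0 ((PySem.List.count c "Z" : ℕ) : Int) 1).length
      = PySem.List.count c "Z" := by
    simp [PySem.List.length_pyRange_one]
  rw [pv_foldl_iterate, hlen]
  have := pv_iter_eq c 0
  simp only [List.append_nil, List.replicate, Nat.zero_add] at this
  have hcount : PySem.List.count c "Z" = c.count "Z" := by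
    simp [PySem.List.count_eq]
  rw [hcount, this]
  have h := pv_filter_len c
  have h2 : c.length - (c.filter (fun x => x != "Z")).length = c.count "Z" := by omega
  simp only [h2]

-- ===== VERDICT (by name: the statement is the Claim_ definition above) =====
theorem fill_gap_spec : Claim_equal_fill_gap := by
  intro board _
  unfold Spec_fill_gap fill_gap fill_gap_alt pvCollapse
  have h2 : PySem.List.pyRange 0 2 1 = [0, 1] := by decide
  simp only [h2]
  simp [List.foldl, List.map_congr_left (fun c _ => pv_colA_eq_colB c)]
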